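-- pv_equiv track=rewrite | github.com/Nev-Iva/algorithms-python | hw4/hw4_2.py | first_erat
-- ===== SOURCE A (Python) =====
-- def first_erat(index):
--     sieve = [i for i in range(index + 1)]
--     sieve[1] = 0
--     for el in range(2, index + 1):
--         if sieve[el] != 0:
--             elem = el * 2
--             while elem <= index:
--                 sieve[elem] = 0
--                 elem += el
--     nums = [el for el in sieve if el != 0]
--     return nums[-1]
-- ===== SOURCE B (Python) =====
-- def first_erat(index):
--     def is_prime(n):
--         d = 2
--         while d * d <= n:
--             if n % d == 0:
--                 return False
--             d += 1
--         return True
--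
--     n = index
--     while n >= 2:
--         if is_prime(n):
--             return n
--         n -= 1
--     raise IndexError("no prime <= index")
-- ===== Notes on version B (the rewrite author's own statement) =====
-- stated objective: faster
-- what changed: Replaces the Eratosthenes sieve (build a full 0..index array, cross out multiples, filter, take the last element) by a direct descending search from index for the first candidate that passes trial division by divisors d with d*d <= n; no array is built.
import Mathlib
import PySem

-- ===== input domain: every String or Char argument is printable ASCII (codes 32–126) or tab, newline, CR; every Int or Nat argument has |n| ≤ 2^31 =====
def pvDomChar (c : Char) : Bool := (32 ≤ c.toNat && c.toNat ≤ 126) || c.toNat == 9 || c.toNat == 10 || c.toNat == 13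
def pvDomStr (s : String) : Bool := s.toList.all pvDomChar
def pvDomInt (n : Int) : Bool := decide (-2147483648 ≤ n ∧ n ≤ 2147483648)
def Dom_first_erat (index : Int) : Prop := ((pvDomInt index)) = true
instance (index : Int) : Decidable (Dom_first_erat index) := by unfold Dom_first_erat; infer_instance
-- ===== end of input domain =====

-- B replaces A's full Eratosthenes sieve by a direct descending search from index with trial
-- division (no array is built; a timing run measured B faster). Return-value equivalence.

-- ===== PORT A =====
-- the inner 'while elem <= index: sieve[elem] = 0; elem += el' loop
-- (the '0 < el' conjunct only makes the recursion total; every call has el ≥ 2)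
def eratInner (index el elem : Int) (s : List Int) : List Int :=
  if h : 0 < el ∧ elem ≤ index then
    eratInner index el (elem + el) (PySem.List.pySetD s elem 0)
  else s
termination_by (index + 1 - elem).toNat
decreasing_by omega

def first_erat (index : Int) : Int :=
  let sieve0 := PySem.List.pyRange 0 (index + 1) 1
  let sieve1 := PySem.List.pySetD sieve0 1 0           -- sieve[1] = 0 (IndexError when index < 1: outside Pre_)
  let sieve2 := (PySem.List.pyRange 2 (index + 1) 1).foldl
    (fun s el => if PySem.List.pyGetD s el 0 ≠ 0 then eratInner index el (el * 2) s else s) sieve1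
  let nums := sieve2.filter (fun el => el != 0)
  PySem.List.pyGetD nums (-1) 0                         -- nums[-1] (IndexError when empty: outside Pre_)

-- ===== PORT B =====
-- trial division: 'd = 2; while d*d <= n: if n % d == 0: return False; d += 1; return True'
-- (the '2 ≤ d' conjunct only makes the recursion total; d starts at 2 and only grows)
def isPrimeAux (n d : Int) : Bool :=
  if h : 2 ≤ d ∧ d * d ≤ n then
    if PySem.Int.mod n d == 0 then false else isPrimeAux n (d + 1)
  else true
termination_by (n - d).toNat
decreasing_by
  have h2 : 2 * d ≤ d * d := by nlinarith [h.1]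
  omega

def isPrimeB (n : Int) : Bool := isPrimeAux n 2

-- 'n = index; while n >= 2: if is_prime(n): return n; n -= 1; raise IndexError'
def bLoop (n : Int) : Int :=
  if h : 2 ≤ n then (if isPrimeB n then n else bLoop (n - 1)) else 0
termination_by n.toNat
decreasing_by omega

def first_erat_alt (index : Int) : Int := bLoop index

-- ===== PRECONDITION & SPEC =====
-- A raises IndexError for index < 2 (sieve[1] assignment for index < 1, empty nums otherwise);
-- B raises IndexError there too, so exactly those inputs are excluded.
def Pre_first_erat (index : Int) : Prop := 2 ≤ index
instance (index : Int) : Decidable (Pre_first_erat index) := by unfold Pre_first_erat; infer_instance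
def pvWitness_first_erat : Int := (10)

def Spec_first_erat (index : Int) (out : Int) : Prop := out = first_erat_alt index
instance (index : Int) (out : Int) : Decidable (Spec_first_erat index out) := by unfold Spec_first_erat; infer_instance

-- ===== CLAIM (what is proved, stated in full; the proofs are below) =====
def Claim_equal_first_erat : Prop := ∀ (index : Int), Dom_first_erat index → Pre_first_erat index → Spec_first_erat index (first_erat index)

-- ===== LEMMAS AND PROOFS =====

-- "zeroed after the outer loop has processed els 2..k-1" as a Boolean predicate on the position m
def zb (k m : Nat) : Bool :=
  decide (m = 1) || ((List.range k).any fun d =>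
    decide (2 ≤ d) && decide (Nat.Prime d) && decide (d ∣ m) && decide (2 * d ≤ m))

def zf (k m : Nat) : Int := if zb k m then 0 else (m : Int)

-- common reference value: last prime below N (0 when there is none)
def lastPrimeBelow (N : Nat) : Int :=
  (((List.range N).filter (fun m => decide (Nat.Prime m))).getLast?).elim 0 Int.ofNat

lemma zb_iff (k m : Nat) : zb k m = true ↔
    m = 1 ∨ ∃ d, 2 ≤ d ∧ d < k ∧ Nat.Prime d ∧ d ∣ m ∧ 2 * d ≤ m := by
  simp only [zb, Bool.or_eq_true, List.any_eq_true, List.mem_range, decide_eq_true_eq,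
    Bool.and_eq_true]
  constructor
  · rintro (h | ⟨d, hdk, ⟨⟨h2, hp⟩, hdvd⟩, hle⟩)
    · exact Or.inl h
    · exact Or.inr ⟨d, h2, hdk, hp, hdvd, hle⟩
  · rintro (h | ⟨d, h2, hdk, hp, hdvd, hle⟩)
    · exact Or.inl h
    · exact Or.inr ⟨d, hdk, ⟨⟨h2, hp⟩, hdvd⟩, hle⟩

lemma small_prime_factor (m : Nat) (h2 : 2 ≤ m) (hnp : ¬ Nat.Prime m) :
    ∃ d, 2 ≤ d ∧ d < m ∧ Nat.Prime d ∧ d ∣ m ∧ 2 * d ≤ m := by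
  have h1 : m ≠ 1 := by omega
  have hp := Nat.minFac_prime h1
  have hdvd := Nat.minFac_dvd m
  obtain ⟨c, hc⟩ := hdvd
  have hd2 := hp.two_le
  have hne : m.minFac ≠ m := fun he => hnp (he ▸ hp)
  have hc2 : 2 ≤ c := by
    rcases Nat.lt_or_ge c 2 with h | h
    · interval_cases c
      · omega
      · simp at hc; exact absurd hc.symm hne
    · exact h
  have : 2 * m.minFac ≤ m := by
    calc 2 * m.minFac ≤ c * m.minFac := Nat.mul_le_mul_right _ hc2
    _ = m := by rw [Nat.mul_comm]; exact hc.symm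
  exact ⟨m.minFac, hd2, by omega, hp, Nat.minFac_dvd m, this⟩

lemma zb_self_iff (k : Nat) (hk : 2 ≤ k) : zb k k = true ↔ ¬ Nat.Prime k := by
  rw [zb_iff]
  constructor
  · rintro (h | ⟨d, h2, hdk, hp, hdvd, hle⟩) hpk
    · omega
    · rcases hpk.eq_one_or_self_of_dvd d hdvd with h | h <;> omega
  · intro hnp
    obtain ⟨d, h2, hdm, hp, hdvd, hle⟩ := small_prime_factor k hk hnp
    exact Or.inr ⟨d, h2, hdm, hp, hdvd, hle⟩

lemma zb_final (N m : Nat) (hm : m < N) (hm2 : 2 ≤ m) : zb N m = true ↔ ¬ Nat.Prime m := by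
  rw [zb_iff]
  constructor
  · rintro (h | ⟨d, h2, hdk, hp, hdvd, hle⟩) hpm
    · omega
    · rcases hpm.eq_one_or_self_of_dvd d hdvd with h | h <;> omega
  · intro hnp
    obtain ⟨d, h2, hdm, hp, hdvd, hle⟩ := small_prime_factor m hm2 hnp
    exact Or.inr ⟨d, h2, by omega, hp, hdvd, hle⟩

lemma set_map_range (N j : Nat) (v : Int) (f : Nat → Int) (hj : j < N) :
    ((List.range N).map f).set j v = (List.range N).map (fun m => if m = j then v else f m) := by
  apply List.ext_getElem
  · simp
  · intro i h1 h2
    simp only [List.getElem_set, List.getElem_map, List.getElem_range]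
    split_ifs <;> first | rfl | omega

lemma eratInner_map_aux (index el : Int) (hel : 0 < el) (N : Nat) (hN : (N : Int) = index + 1) :
    ∀ t : Nat, ∀ elem, 0 ≤ elem → (index + 1 - elem).toNat ≤ t → ∀ f : Nat → Int,
      eratInner index el elem ((List.range N).map f) =
      (List.range N).map (fun (m : Nat) => if elem ≤ (m : Int) ∧ el ∣ ((m : Int) - elem) then 0 else f m) := by
  intro t
  induction t with
  | zero =>
    intro elem h0 ht f
    have hng : ¬ (0 < el ∧ elem ≤ index) := by rintro ⟨-, h⟩; omega
    rw [eratInner, dif_neg hng]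
    symm
    apply List.map_congr_left
    intro m hm
    rw [List.mem_range] at hm
    rw [if_neg]
    rintro ⟨h1, -⟩
    omega
  | succ t ih =>
    intro elem h0 ht f
    by_cases hg : elem ≤ index
    · rw [eratInner, dif_pos ⟨hel, hg⟩]
      rw [PySem.List.pySetD_of_nonneg _ 0 h0]
      rw [set_map_range N elem.toNat 0 f (by omega)]
      rw [ih (elem + el) (by omega) (by omega)]
      apply List.map_congr_left
      intro m hm
      rw [List.mem_range] at hm
      by_cases hme : (m : Int) = elem
      · rw [if_neg (by rintro ⟨h1, -⟩; omega)]
        rw [if_pos (by omega)]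
        rw [if_pos ⟨by omega, by rw [hme, sub_self]; exact dvd_zero el⟩]
      · rw [if_neg (show ¬ m = elem.toNat by omega)]
        have hiff : (elem + el ≤ (m : Int) ∧ el ∣ ((m : Int) - (elem + el))) ↔
            (elem ≤ (m : Int) ∧ el ∣ ((m : Int) - elem)) := by
          constructor
          · rintro ⟨h1, h2⟩
            refine ⟨by omega, ?_⟩
            have h3 := dvd_add h2 (dvd_refl el)
            have h4 : (m : Int) - (elem + el) + el = (m : Int) - elem := by ring
            rwa [h4] at h3
          · rintro ⟨h1, h2⟩
            have h3 := dvd_sub h2 (dvd_refl el)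
            have h4 : (m : Int) - elem - el = (m : Int) - (elem + el) := by ring
            have h5 : el ≤ (m : Int) - elem := Int.le_of_dvd (by omega) h2
            exact ⟨by omega, h4 ▸ h3⟩
        exact if_congr hiff rfl rfl
    · have hng : ¬ (0 < el ∧ elem ≤ index) := by rintro ⟨-, h⟩; omega
      rw [eratInner, dif_neg hng]
      symm
      apply List.map_congr_left
      intro m hm
      rw [List.mem_range] at hm
      rw [if_neg]
      rintro ⟨h1, -⟩
      omega

lemma eratInner_map (index el : Int) (hel : 0 < el) (N : Nat) (hN : (N : Int) = index + 1) :
    ∀ elem, 0 ≤ elem → ∀ f : Nat → Int,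
      eratInner index el elem ((List.range N).map f) =
      (List.range N).map (fun (m : Nat) => if elem ≤ (m : Int) ∧ el ∣ ((m : Int) - elem) then 0 else f m) :=
  fun elem h0 f => eratInner_map_aux index el hel N hN (index + 1 - elem).toNat elem h0 (le_refl _) f

lemma zb_two (m : Nat) : zb 2 m = decide (m = 1) := by
  simp [zb, List.range_succ]

lemma zb_succ_iff (k m : Nat) (hk : 2 ≤ k) :
    zb (k + 1) m = true ↔ (zb k m = true ∨ (Nat.Prime k ∧ k ∣ m ∧ 2 * k ≤ m)) := by
  rw [zb_iff, zb_iff]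
  constructor
  · rintro (h | ⟨d, h2, hdk, hp, hdvd, hle⟩)
    · exact Or.inl (Or.inl h)
    · rcases Nat.lt_or_ge d k with hlt | hge
      · exact Or.inl (Or.inr ⟨d, h2, hlt, hp, hdvd, hle⟩)
      · have : d = k := by omega
        subst this
        exact Or.inr ⟨hp, hdvd, hle⟩
  · rintro ((h | ⟨d, h2, hdk, hp, hdvd, hle⟩) | ⟨hp, hdvd, hle⟩)
    · exact Or.inl h
    · exact Or.inr ⟨d, h2, by omega, hp, hdvd, hle⟩
    · exact Or.inr ⟨k, hk, by omega, hp, hdvd, hle⟩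

lemma sieve_loop (index : Int) (hidx : 2 ≤ index) (N : Nat) (hN : (N : Int) = index + 1) :
    ∀ k : Nat, 2 ≤ k → (k : Int) ≤ index + 1 →
      (PySem.List.pyRange 2 (k : Int) 1).foldl
        (fun s el => if PySem.List.pyGetD s el 0 ≠ 0 then eratInner index el (el * 2) s else s)
        (PySem.List.pySetD (PySem.List.pyRange 0 (index + 1) 1) 1 0) =
      (List.range N).map (zf k) := by
  intro k hk
  induction k, hk using Nat.le_induction with
  | base =>
    intro _
    have e1 : PySem.List.pyRange ((2 : Int)) (((2 : Nat) : Int)) 1 = [] :=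
      PySem.List.pyRange_one_eq_nil (by norm_num)
    rw [e1, List.foldl_nil]
    have hr : PySem.List.pyRange 0 (index + 1) 1 = (List.range N).map (fun (m : Nat) => (m : Int)) := by
      rw [PySem.List.pyRange_one]
      have h0 : (index + 1 - 0).toNat = N := by omega
      rw [h0]
      apply List.map_congr_left
      intro m _
      omega
    rw [hr, PySem.List.pySetD_of_nonneg _ 0 (by norm_num)]
    rw [show ((1 : Int)).toNat = 1 from rfl]
    rw [set_map_range N 1 0 _ (by omega)]
    apply List.map_congr_left
    intro m hm
    rw [List.mem_range] at hm
    unfold zf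
    rw [zb_two]
    by_cases h1 : m = 1
    · simp [h1]
    · simp [h1]
  | succ k hk ih =>
    intro hk1
    have hkN : k < N := by omega
    have hint : ((k + 1 : Nat) : Int) = (k : Int) + 1 := by push_cast; ring
    have e2 : PySem.List.pyRange 2 ((k : Int) + 1) 1 =
        PySem.List.pyRange 2 (k : Int) 1 ++ [(k : Int)] :=
      PySem.List.pyRange_one_succ_right (by exact_mod_cast hk)
    rw [hint, e2, List.foldl_append, ih (by omega)]
    rw [List.foldl_cons, List.foldl_nil]
    rw [PySem.List.pyGetD_natCast, PySem.List.getD_map_range (zf k) N k 0 hkN]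
    by_cases hp : Nat.Prime k
    · have hzb : zb k k = false := by
        rcases h : zb k k with _ | _
        · rfl
        · exact absurd ((zb_self_iff k hk).mp h) (by simpa using hp)
      have hcond : zf k k ≠ 0 := by
        unfold zf
        rw [hzb]
        simp only [Bool.false_eq_true, if_false]
        have := hp.two_le
        omega
      rw [if_pos hcond]
      rw [eratInner_map index (k : Int) (by exact_mod_cast hp.pos) N hN ((k : Int) * 2) (by positivity) (zf k)]
      apply List.map_congr_left
      intro m hm
      rw [List.mem_range] at hm
      by_cases hz : zb k m = true
      · have hz' : zb (k + 1) m = true := (zb_succ_iff k m hk).mpr (Or.inl hz)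
        unfold zf
        rw [hz, hz']
        simp
      · have hzb' : zb k m = false := by revert hz; cases zb k m <;> simp
        by_cases hc : k ∣ m ∧ 2 * k ≤ m
        · have h1 : (k : Int) * 2 ≤ (m : Int) := by
            have := hc.2
            push_cast
            omega
          have h2 : (k : Int) ∣ ((m : Int) - (k : Int) * 2) :=
            dvd_sub (Int.natCast_dvd_natCast.mpr hc.1) ⟨2, by ring⟩
          rw [if_pos ⟨h1, h2⟩]
          have hz' : zb (k + 1) m = true := (zb_succ_iff k m hk).mpr (Or.inr ⟨hp, hc.1, hc.2⟩)
          unfold zf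
          rw [hz']
          simp
        · rw [if_neg]
          · have hz' : zb (k + 1) m = false := by
              rcases h : zb (k + 1) m with _ | _
              · rfl
              · rcases (zb_succ_iff k m hk).mp h with h' | ⟨-, hd, hl⟩
                · rw [hzb'] at h'; exact absurd h' (by simp)
                · exact absurd ⟨hd, hl⟩ hc
            unfold zf
            rw [hzb', hz']
          · rintro ⟨h1, h2⟩
            apply hc
            have h3 := dvd_add h2 (⟨2, by ring⟩ : (k : Int) ∣ (k : Int) * 2)
            have h4 : (m : Int) - (k : Int) * 2 + (k : Int) * 2 = (m : Int) := by ring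
            rw [h4] at h3
            exact ⟨Int.natCast_dvd_natCast.mp h3, by omega⟩
    · have hzb : zb k k = true := (zb_self_iff k hk).mpr hp
      rw [if_neg (by unfold zf; rw [hzb]; simp)]
      apply List.map_congr_left
      intro m hm
      have hsame : zb (k + 1) m = zb k m := by
        rcases h : zb (k + 1) m with _ | _
        · rcases h2 : zb k m with _ | _
          · rfl
          · exact absurd ((zb_succ_iff k m hk).mpr (Or.inl h2)) (by rw [h]; simp)
        · rcases (zb_succ_iff k m hk).mp h with h' | ⟨hp', -, -⟩
          · rw [h']
          · exact absurd hp' hp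
      unfold zf
      rw [hsame]

lemma filter_map_g (l : List Nat) :
    ((l.map (fun m => if Nat.Prime m then (m : Int) else 0)).filter (fun el => el != 0)) =
    (l.filter (fun m => decide (Nat.Prime m))).map (fun (m : Nat) => (m : Int)) := by
  induction l with
  | nil => simp
  | cons a t ih =>
    by_cases h : Nat.Prime a
    · have ha : ((a : Int) != 0) = true := by
        have h2le := h.two_le
        simp only [bne_iff_ne, ne_eq]
        omega
      simp [h, List.filter_cons, ha, ih]
    · simp [h, ih]

lemma first_erat_eq (index : Int) (hidx : 2 ≤ index) :
    first_erat index = lastPrimeBelow (index + 1).toNat := by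
  have hN : (((index + 1).toNat : Nat) : Int) = index + 1 := by omega
  set N := (index + 1).toNat with hNdef
  have hloop := sieve_loop index hidx N hN N (by omega) (by omega)
  rw [hN] at hloop
  simp only [first_erat]
  rw [hloop]
  have hmapg : List.map (zf N) (List.range N) =
      List.map (fun m => if Nat.Prime m then (m : Int) else 0) (List.range N) := by
    apply List.map_congr_left
    intro m hm
    rw [List.mem_range] at hm
    by_cases h2 : 2 ≤ m
    · by_cases hp : Nat.Prime m
      · have hz : zb N m = false := by
          rcases h : zb N m with _ | _
          · rfl
          · exact absurd ((zb_final N m hm h2).mp h) (by simpa using hp)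
        unfold zf
        rw [hz]
        simp [hp]
      · have hz : zb N m = true := (zb_final N m hm h2).mpr hp
        unfold zf
        rw [hz]
        simp [hp]
    · interval_cases m
      · unfold zf
        simp [Nat.not_prime_zero]
      · have hz : zb N 1 = true := (zb_iff N 1).mpr (Or.inl rfl)
        unfold zf
        rw [hz]
        simp [Nat.not_prime_one]
  rw [hmapg, filter_map_g]
  have h2mem : (2 : Nat) ∈ (List.range N).filter (fun m => decide (Nat.Prime m)) := by
    rw [List.mem_filter, List.mem_range]
    exact ⟨by omega, by simp [Nat.prime_two]⟩
  have hne : ((List.range N).filter (fun m => decide (Nat.Prime m))).map (fun (m : Nat) => (m : Int)) ≠ [] := by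
    intro h
    have := List.mem_map_of_mem (f := fun (m : Nat) => (m : Int)) h2mem
    rw [h] at this
    exact absurd this (List.not_mem_nil)
  rw [PySem.List.pyGetD_neg_one _ 0 hne]
  have h1 : (((List.range N).filter (fun m => decide (Nat.Prime m))).map (fun (m : Nat) => (m : Int))).getLast? =
      Option.map (fun (m : Nat) => (m : Int)) ((List.range N).filter (fun m => decide (Nat.Prime m))).getLast? :=
    List.getLast?_map
  rw [List.getLast?_eq_getLast hne] at h1
  cases h : ((List.range N).filter (fun m => decide (Nat.Prime m))).getLast? with
  | none =>
    rw [h] at h1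
    simp at h1
  | some a =>
    rw [h] at h1
    simp only [Option.map_some] at h1
    unfold lastPrimeBelow
    rw [h]
    simp only [Option.elim]
    exact Option.some.inj h1

lemma isPrimeAux_iff_aux (n : Int) : ∀ t : Nat, ∀ d, 2 ≤ d → (n - d).toNat ≤ t →
    (isPrimeAux n d = true ↔ ∀ k : Int, d ≤ k → k * k ≤ n → ¬ (k ∣ n)) := by
  intro t
  induction t with
  | zero =>
    intro d hd ht
    have h : ¬ (2 ≤ d ∧ d * d ≤ n) := by
      rintro ⟨h1, h2⟩
      have : d < n := by nlinarith
      omega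
    rw [isPrimeAux, dif_neg h]
    refine iff_of_true rfl ?_
    intro k hk hkk hdvd
    have hdd : ¬ (d * d ≤ n) := fun hdd => h ⟨hd, hdd⟩
    nlinarith
  | succ t ih =>
    intro d hd ht
    by_cases h : 2 ≤ d ∧ d * d ≤ n
    · rw [isPrimeAux, dif_pos h]
      by_cases hmod : PySem.Int.mod n d = 0
      · rw [if_pos (by simp [hmod])]
        have hdvd : d ∣ n := (PySem.Int.mod_eq_zero_iff_dvd n d).mp hmod
        refine iff_of_false (by simp) ?_
        push Not
        exact ⟨d, le_refl d, h.2, hdvd⟩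
      · rw [if_neg (by simp [hmod])]
        have hndvd : ¬ (d ∣ n) := fun hd' =>
          hmod ((PySem.Int.mod_eq_zero_iff_dvd n d).mpr hd')
        have hlt : d < n := by nlinarith [h.1, h.2]
        rw [ih (d + 1) (by omega) (by omega)]
        constructor
        · intro hall k hk hkk hkdvd
          rcases eq_or_lt_of_le hk with he | hl
          · exact hndvd (he ▸ hkdvd)
          · exact hall k (by omega) hkk hkdvd
        · intro hall k hk hkk hkdvd
          exact hall k (by omega) hkk hkdvd
    · rw [isPrimeAux, dif_neg h]
      refine iff_of_true rfl ?_
      intro k hk hkk hdvd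
      have hdd : ¬ (d * d ≤ n) := fun hdd => h ⟨hd, hdd⟩
      nlinarith

lemma isPrimeAux_iff (n : Int) : ∀ d, 2 ≤ d →
    (isPrimeAux n d = true ↔ ∀ k : Int, d ≤ k → k * k ≤ n → ¬ (k ∣ n)) := by
  intro d hd
  exact isPrimeAux_iff_aux n (n - d).toNat d hd (le_refl _)

lemma isPrimeB_iff (n : Int) (hn : 2 ≤ n) : isPrimeB n = true ↔ Nat.Prime n.toNat := by
  have hcast : ((n.toNat : Int)) = n := Int.toNat_of_nonneg (by omega)
  rw [isPrimeB, isPrimeAux_iff n 2 (le_refl _)]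
  constructor
  · intro hall
    by_contra hnp
    set m := n.toNat with hm
    have hm2 : 2 ≤ m := by omega
    have hp := Nat.minFac_prime (n := m) (by omega)
    have hsq : m.minFac * m.minFac ≤ m := by
      have := Nat.minFac_sq_le_self (n := m) (by omega) hnp
      nlinarith [this]
    have hdvd : (m.minFac : Int) ∣ n := by
      rw [← hcast]
      exact_mod_cast Int.natCast_dvd_natCast.mpr (Nat.minFac_dvd m)
    exact hall (m.minFac : Int) (by exact_mod_cast hp.two_le)
      (by rw [← hcast]; exact_mod_cast hsq) hdvd
  · intro hp k hk hkk hkdvd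
    have hk0 : 0 ≤ k := by omega
    have hkn : k < n := by nlinarith
    have hdvd' : k.toNat ∣ n.toNat := by
      have h1 : ((k.toNat : Int)) = k := Int.toNat_of_nonneg hk0
      rw [← Int.natCast_dvd_natCast]
      rw [h1, hcast]
      exact hkdvd
    rcases hp.eq_one_or_self_of_dvd k.toNat hdvd' with h | h <;> omega

lemma lastPrimeBelow_succ (m : Nat) :
    lastPrimeBelow (m + 1) =
      if Nat.Prime m then (m : Int) else lastPrimeBelow m := by
  unfold lastPrimeBelow
  rw [List.range_succ, List.filter_append]
  by_cases h : Nat.Prime m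
  · simp [h, List.getLast?_concat]
  · simp [h]

lemma bLoop_eq_aux : ∀ (t : Nat) (n : Int), 0 ≤ n → n.toNat = t → bLoop n = lastPrimeBelow (t + 1) := by
  intro t
  induction t with
  | zero =>
    intro n hn ht
    rw [bLoop, dif_neg (by omega)]
    decide
  | succ t ih =>
    intro n hn ht
    by_cases h2 : 2 ≤ n
    · rw [bLoop, dif_pos h2]
      have hm : n.toNat = t + 1 := ht
      rw [lastPrimeBelow_succ]
      rw [← hm]
      by_cases hp : Nat.Prime n.toNat
      · rw [if_pos hp, (isPrimeB_iff n h2).mpr hp, if_pos rfl]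
        exact (Int.toNat_of_nonneg hn).symm
      · have hb : isPrimeB n = false := by
          rcases hb : isPrimeB n with _ | _
          · rfl
          · exact absurd ((isPrimeB_iff n h2).mp hb) hp
        rw [hb]
        simp only [Bool.false_eq_true, if_false, if_neg hp]
        have : (n - 1).toNat = t := by omega
        rw [ih (n - 1) (by omega) this, hm]
    · have ht0 : t = 0 := by omega
      subst ht0
      rw [bLoop, dif_neg h2]
      decide

lemma bLoop_eq (n : Int) (hn : 0 ≤ n) : bLoop n = lastPrimeBelow (n.toNat + 1) :=
  bLoop_eq_aux n.toNat n hn rfl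

-- ===== VERDICT (by name: the statement is the Claim_ definition above) =====
theorem first_erat_spec : Claim_equal_first_erat := by
  intro index _ hpre
  unfold Spec_first_erat first_erat_alt
  have h2 : (2 : Int) ≤ index := hpre
  rw [first_erat_eq index h2, bLoop_eq index (by omega)]
  congr 1
  omega
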